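-- pv_equiv track=rewrite | github.com/rahulanand/Python-Programming | find_reduced_string.py | find_reduced_string
-- ===== SOURCE A (Python) =====
-- def find_sum(n, threshold):
-- 	sum = 0
-- 	red_string = ''
-- 	for i in n:
-- 		sum += int(i)
-- 		if sum > threshold:
-- 		 	red_string = red_string + str(sum)
-- 		 	threshold = sum
-- 		 	sum = 0
-- 	return red_string, threshold
--
-- def find_reduced_string(n, threshold):
-- 	x = sum_str(n)
-- 	if x > threshold:
-- 		new_str, sum = find_sum(n, threshold)
-- 		y = find_reduced_string(new_str, sum)
-- 		return y
-- 	else: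
-- 		return x
--
-- def sum_str(st):
-- 	sum = 0
-- 	for i in st:
-- 		sum += int(i)
-- 	return sum
-- ===== SOURCE B (Python) =====
-- def _chunk_sums(digits, t):
--     # prefix sums over the digit list; a chunk closes when its sum exceeds the
--     # last closed chunk's sum (initially t), so the chunk sums are increasing
--     sums = []
--     acc = 0
--     for d in digits:
--         acc += d
--         if acc > (sums[-1] if sums else t):
--             sums.append(acc)
--             acc = 0
--     return sums
--
--
-- def _digits_of(m):
--     # decimal digits of a non-negative int, by arithmetic (no str round-trip)
--     if m == 0:
--         return [0]
--     out = []
--     while m > 0: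
--         out.append(m % 10)
--         m //= 10
--     return out[::-1]
--
--
-- def find_reduced_string(n, threshold):
--     # works on a list of digit VALUES throughout: parse once, loop (no recursion,
--     # no string building), expand each chunk sum back to digits arithmetically
--     digits = [int(c) for c in n]
--     t = threshold
--     while sum(digits) > t:
--         sums = _chunk_sums(digits, t)
--         t = sums[-1]
--         digits = [d for s in sums for d in _digits_of(s)]
--     return sum(digits)
-- ===== Notes on version B (the rewrite author's own statement) =====
-- stated objective: alternative
-- what changed: A recurses over strings, concatenating str(sum) chunks and re-parsing them each round; B parses the digits once and loops over a list of digit values, keeping the chunk sums as an int list (the threshold is its last element) and expanding each sum back to digits arithmetically, with no recursion and no string round-trip.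
import Mathlib
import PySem

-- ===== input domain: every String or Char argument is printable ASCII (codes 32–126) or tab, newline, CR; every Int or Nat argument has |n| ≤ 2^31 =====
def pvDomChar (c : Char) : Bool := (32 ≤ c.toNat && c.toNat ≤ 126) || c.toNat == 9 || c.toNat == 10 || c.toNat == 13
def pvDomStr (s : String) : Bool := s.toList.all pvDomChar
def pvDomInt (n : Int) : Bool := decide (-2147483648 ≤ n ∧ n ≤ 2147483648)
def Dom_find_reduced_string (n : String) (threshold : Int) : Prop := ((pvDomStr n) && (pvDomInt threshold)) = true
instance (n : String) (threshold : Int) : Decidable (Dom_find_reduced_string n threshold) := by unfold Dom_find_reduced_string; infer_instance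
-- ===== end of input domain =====

-- B replaces A's recursion over strings by a loop over a list of digit VALUES:
-- parse once, keep the chunk sums as an Int list (threshold = its last element),
-- and expand each chunk sum back to digits arithmetically (objective: alternative).

-- ===== PORT A =====
-- int(i) for a single digit char (exact on Pre_, which restricts to '0'..'9')
def pvDigit (c : Char) : Int := (c.toNat : Int) - 48

-- sum_str(st)
def pvSumStr (st : List Char) : Int := st.foldl (fun s c => s + pvDigit c) 0

-- find_sum(n, threshold): state (sum, red_string, threshold), red_string kept as chars
def pvFindSum (n : List Char) (threshold : Int) : List Char × Int :=
  let st := n.foldl (fun (s : Int × List Char × Int) c =>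
      let sum := s.1 + pvDigit c
      if sum > s.2.2 then (0, s.2.1 ++ PySem.Int.toChars sum, sum)
      else (sum, s.2.1, s.2.2)) (0, [], threshold)
  (st.2.1, st.2.2)

-- the recursion of A; fuel only makes it total (never exhausted on Pre_ inputs)
def pvFindRedA : Nat → List Char → Int → Int
  | 0, n, _ => pvSumStr n
  | fuel + 1, n, threshold =>
    let x := pvSumStr n
    if x > threshold then
      let r := pvFindSum n threshold
      pvFindRedA fuel r.1 r.2
    else x

def find_reduced_string (n : String) (threshold : Int) : Int :=
  pvFindRedA ((pvSumStr n.toList - threshold).toNat + 1) n.toList threshold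

-- ===== PORT B =====
-- _chunk_sums(digits, t): structural recursion over the digit values; the current
-- threshold is not carried as state but read off as the last closed chunk's sum
def pvChunkSums : List Int → Int → Int → List Int → List Int
  | [], _, _, sums => sums
  | d :: rest, t, acc, sums =>
    if acc + d > sums.getLastD t then pvChunkSums rest t 0 (sums ++ [acc + d])
    else pvChunkSums rest t (acc + d) sums

-- the while-loop of _digits_of (little-endian digit collection)
def pvDigitsLoop : Nat → List Int
  | 0 => []
  | m + 1 => (((m + 1) % 10 : Nat) : Int) :: pvDigitsLoop ((m + 1) / 10)
  decreasing_by exact Nat.div_lt_self (Nat.succ_pos m) (by omega)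

-- _digits_of(m)
def pvDigitsOf (m : Int) : List Int :=
  if m = 0 then [0] else (pvDigitsLoop m.toNat).reverse

-- the while-loop of B; same fuel guard for totality (never exhausted on Pre_ inputs).
-- sums[-1] is total here as getLastD: on Pre_ inputs the chunk list is never empty
-- when the loop body runs, so the default is never read.
def pvReduceB : Nat → List Int → Int → Int
  | 0, digits, _ => digits.sum
  | fuel + 1, digits, t =>
    if digits.sum > t then
      let sums := pvChunkSums digits t 0 []
      pvReduceB fuel (sums.flatMap pvDigitsOf) (sums.getLastD t)
    else digits.sum

def find_reduced_string_alt (n : String) (threshold : Int) : Int :=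
  let digits := n.toList.map pvDigit
  pvReduceB ((digits.sum - threshold).toNat + 1) digits threshold

-- ===== PRECONDITION & SPEC =====
-- Pre_ excludes inputs where the Python A raises: any non-digit character makes
-- int(i) raise ValueError, and n = '' with threshold < 0 recurses until RecursionError.
def Pre_find_reduced_string (n : String) (threshold : Int) : Prop :=
  (n.toList.all fun c => 48 ≤ c.toNat && c.toNat ≤ 57) = true ∧ (n.toList = [] → 0 ≤ threshold)
instance (n : String) (threshold : Int) : Decidable (Pre_find_reduced_string n threshold) := by
  unfold Pre_find_reduced_string; infer_instance

def pvWitness_find_reduced_string : String × Int := ("1234", 2)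

def Spec_find_reduced_string (n : String) (threshold : Int) (out : Int) : Prop :=
  out = find_reduced_string_alt n threshold
instance (n : String) (threshold : Int) (out : Int) : Decidable (Spec_find_reduced_string n threshold out) := by
  unfold Spec_find_reduced_string; infer_instance

-- ===== CLAIM (what is proved, stated in full; the proofs are below) =====
def Claim_equal_find_reduced_string : Prop := ∀ (n : String) (threshold : Int), Dom_find_reduced_string n threshold → Pre_find_reduced_string n threshold → Spec_find_reduced_string n threshold (find_reduced_string n threshold)

-- ===== LEMMAS AND PROOFS =====

-- sum_str is the sum of the digit values
theorem pvSumStr_eq_sum_map (l : List Char) : pvSumStr l = (l.map pvDigit).sum := by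
  have h : ∀ a : Int, l.foldl (fun s c => s + pvDigit c) a = a + (l.map pvDigit).sum := by
    induction l with
    | nil => intro a; simp
    | cons c rest ih => intro a; simp [List.foldl_cons, ih]; ring
  simpa using h 0

-- reading a digit char back as a value
theorem pvDigit_digitChar (k : Nat) (hk : k < 10) : pvDigit (Nat.digitChar k) = (k : Int) := by
  interval_cases k <;> decide

-- str(m) for 0 ≤ m, read digitwise, is _digits_of(m): first on toDigitsCore …
theorem pvDigitsLoop_pos (m : Nat) (h : 0 < m) :
    pvDigitsLoop m = ((m % 10 : Nat) : Int) :: pvDigitsLoop (m / 10) := by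
  cases m with
  | zero => omega
  | succ k => rw [pvDigitsLoop]

theorem pvToDigitsCore_map (fuel : Nat) : ∀ (m : Nat) (ds : List Char), m < fuel →
    (Nat.toDigitsCore 10 fuel m ds).map pvDigit =
      (if m = 0 then [0] else (pvDigitsLoop m).reverse) ++ ds.map pvDigit := by
  induction fuel with
  | zero => intro m ds h; omega
  | succ f ih =>
    intro m ds h
    rw [Nat.toDigitsCore]
    by_cases h0 : m / 10 = 0
    · simp only [h0, if_pos, List.map_cons]
      by_cases hz : m = 0
      · subst hz; simp [pvDigit]; decide
      · rw [if_neg hz, pvDigitsLoop_pos m (by omega), h0, pvDigitsLoop,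
          pvDigit_digitChar _ (Nat.mod_lt _ (by omega))]
        simp
    · have hz : m ≠ 0 := by omega
      have hlt : m / 10 < f := by
        have h2 : m / 10 < m := Nat.div_lt_self (by omega) (by omega)
        omega
      rw [if_neg h0, ih (m / 10) _ hlt, if_neg h0, if_neg hz, pvDigitsLoop_pos m (by omega),
        List.map_cons, pvDigit_digitChar _ (Nat.mod_lt _ (by omega))]
      simp

-- … then on str(m) itself
theorem pvToChars_map (m : Int) (hm : 0 ≤ m) :
    (PySem.Int.toChars m).map pvDigit = pvDigitsOf m := by
  have hneg : ¬ m < 0 := not_lt.mpr hm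
  rw [PySem.Int.toChars, if_neg hneg, Nat.toDigits,
    pvToDigitsCore_map (m.toNat + 1) m.toNat [] (by omega)]
  unfold pvDigitsOf
  have : m = 0 ↔ m.toNat = 0 := by omega
  simp [this]

-- every value _digits_of produces is a digit value, hence non-negative
theorem pvDigitsLoop_nonneg (n : Nat) : ∀ d ∈ pvDigitsLoop n, 0 ≤ d := by
  induction n using Nat.strong_induction_on with
  | _ n ih =>
    cases n with
    | zero => simp [pvDigitsLoop]
    | succ k =>
      rw [pvDigitsLoop]
      intro d hd
      rcases List.mem_cons.mp hd with h | h
      · subst h; positivity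
      · exact ih ((k + 1) / 10) (Nat.div_lt_self (by omega) (by omega)) d h

theorem pvDigitsOf_nonneg (m : Int) : ∀ d ∈ pvDigitsOf m, 0 ≤ d := by
  unfold pvDigitsOf
  split
  · simp
  · intro d hd
    exact pvDigitsLoop_nonneg m.toNat d (List.mem_reverse.mp hd)

-- the chunk sums stay non-negative over non-negative digits
theorem pvChunkSums_nonneg (l : List Int) : ∀ (t acc : Int) (sums : List Int),
    (∀ d ∈ l, 0 ≤ d) → 0 ≤ acc → (∀ s ∈ sums, 0 ≤ s) →
    ∀ s ∈ pvChunkSums l t acc sums, 0 ≤ s := by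
  induction l with
  | nil => intro t acc sums _ _ hs; simpa [pvChunkSums] using hs
  | cons d rest ih =>
    intro t acc sums hl hacc hs
    have hd : 0 ≤ d := hl d (List.mem_cons_self ..)
    have hrest : ∀ x ∈ rest, 0 ≤ x := fun x hx => hl x (List.mem_cons_of_mem _ hx)
    rw [pvChunkSums]
    split
    · exact ih t 0 _ hrest le_rfl (by
        intro s hsm
        rcases List.mem_append.mp hsm with h | h
        · exact hs s h
        · simp only [List.mem_singleton] at h; subst h; positivity)
    · exact ih t (acc + d) sums hrest (by positivity) hs

-- A's find_sum fold and B's pvChunkSums run in lockstep: red_string is the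
-- concatenation of str of the chunk sums, threshold is the last chunk sum
theorem pvLockstep (l : List Char) : ∀ (acc : Int) (sums : List Int) (t : Int),
    (l.foldl (fun (s : Int × List Char × Int) c =>
        let sum := s.1 + pvDigit c
        if sum > s.2.2 then (0, s.2.1 ++ PySem.Int.toChars sum, sum)
        else (sum, s.2.1, s.2.2))
      (acc, (sums.map PySem.Int.toChars).flatten, sums.getLastD t)).2
    = (((pvChunkSums (l.map pvDigit) t acc sums).map PySem.Int.toChars).flatten,
       (pvChunkSums (l.map pvDigit) t acc sums).getLastD t) := by
  induction l with
  | nil => intro acc sums t; simp [pvChunkSums]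
  | cons c rest ih =>
    intro acc sums t
    simp only [List.foldl_cons, List.map_cons]
    rw [pvChunkSums]
    by_cases h : acc + pvDigit c > sums.getLastD t
    · simp only [h, if_pos]
      have hstep := ih 0 (sums ++ [acc + pvDigit c]) t
      simp only [List.map_append, List.flatten_append, List.map_cons, List.map_nil,
        List.flatten_cons, List.flatten_nil, List.append_nil, List.getLastD_concat] at hstep
      exact hstep
    · simp only [h, if_neg, not_false_iff]
      exact ih (acc + pvDigit c) sums t

theorem pvFindSum_eq (n : List Char) (t : Int) :
    pvFindSum n t = (((pvChunkSums (n.map pvDigit) t 0 []).map PySem.Int.toChars).flatten,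
      (pvChunkSums (n.map pvDigit) t 0 []).getLastD t) := by
  unfold pvFindSum
  have := pvLockstep n 0 [] t
  simpa using this

-- str-then-reparse of the chunk sums equals the arithmetic digit expansion
theorem pvNewDigits_eq (r : List Int) (hr : ∀ s ∈ r, 0 ≤ s) :
    ((r.map PySem.Int.toChars).flatten).map pvDigit = r.flatMap pvDigitsOf := by
  rw [List.map_flatten, List.map_map, List.flatMap_def]
  congr 1
  exact List.map_congr_left (fun s hs => pvToChars_map s (hr s hs))

-- the two loops agree step for step
theorem pvMain (fuel : Nat) : ∀ (n : List Char) (t : Int),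
    (∀ d ∈ n.map pvDigit, 0 ≤ d) →
    pvFindRedA fuel n t = pvReduceB fuel (n.map pvDigit) t := by
  induction fuel with
  | zero => intro n t _; simp [pvFindRedA, pvReduceB, pvSumStr_eq_sum_map]
  | succ f ih =>
    intro n t hn
    simp only [pvFindRedA, pvReduceB, pvSumStr_eq_sum_map]
    by_cases hx : (n.map pvDigit).sum > t
    · simp only [hx, if_pos]
      rw [pvFindSum_eq]
      have hr : ∀ s ∈ pvChunkSums (n.map pvDigit) t 0 [], 0 ≤ s :=
        pvChunkSums_nonneg (n.map pvDigit) t 0 [] hn le_rfl (by simp)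
      have hnew := pvNewDigits_eq (pvChunkSums (n.map pvDigit) t 0 []) hr
      rw [ih _ _ (by
        rw [hnew]
        intro d hd
        rcases List.mem_flatMap.mp hd with ⟨s, _, hds⟩
        exact pvDigitsOf_nonneg s d hds)]
      rw [hnew]
    · simp [hx]

-- ===== VERDICT (by name: the statement is the Claim_ definition above) =====
theorem find_reduced_string_spec : Claim_equal_find_reduced_string := by
  intro n threshold _ hpre
  unfold Spec_find_reduced_string find_reduced_string find_reduced_string_alt
  rw [pvSumStr_eq_sum_map]
  exact pvMain _ n.toList threshold (by
    intro d hd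
    rcases List.mem_map.mp hd with ⟨c, hc, rfl⟩
    have h := List.all_eq_true.mp hpre.1 c hc
    simp only [Bool.and_eq_true, decide_eq_true_eq] at h
    unfold pvDigit
    omega)
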